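-- pv_equiv track=rewrite | github.com/alsrbs/algorithm | SWEA/D3/9480. 민정이와 광직이의 알파벳 공부/민정이와 광직이의 알파벳 공부.py | check
-- ===== SOURCE A (Python) =====
-- def check(string): # 소문자 26개가 다 있으면 True 리턴
--     answer = "abcdefghijklmnopqrstuvwxyz"
--     string = list(set(string))
--     cnt = 0
--     for st_ in string:
--         if st_ in answer:
--             cnt += 1
--     if cnt == 26:
--         return 1
--     return 0
-- ===== SOURCE B (Python) =====
-- def check(string):
--     return 1 if all(c in string for c in "abcdefghijklmnopqrstuvwxyz") else 0
-- ===== Notes on version B (the rewrite author's own statement) =====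
-- stated objective: simpler
-- what changed: B drops A's set-building and counting loop entirely: it checks membership of each of the 26 alphabet letters directly in the raw input string via all(...), returning 1/0.
import Mathlib
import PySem

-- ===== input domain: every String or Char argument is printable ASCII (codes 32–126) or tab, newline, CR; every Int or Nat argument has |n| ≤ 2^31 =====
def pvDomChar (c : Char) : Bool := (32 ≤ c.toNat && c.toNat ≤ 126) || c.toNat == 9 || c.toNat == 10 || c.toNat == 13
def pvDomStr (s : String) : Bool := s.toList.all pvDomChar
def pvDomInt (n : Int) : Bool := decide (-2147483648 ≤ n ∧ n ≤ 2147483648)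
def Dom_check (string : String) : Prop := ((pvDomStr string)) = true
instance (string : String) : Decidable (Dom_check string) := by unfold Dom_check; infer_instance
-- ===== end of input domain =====

-- B checks membership of each of the 26 alphabet letters directly in the input (simpler; no set-building/count loop). Return value only.

-- ===== PORT A =====
-- A iterates over list(set(string)); the count is independent of the set's iteration order, so PySem.Set.ofList is exact.
def check (string : String) : Int :=
  let answer : List Char := "abcdefghijklmnopqrstuvwxyz".toList
  let string' : PySem.Set Char := PySem.Set.ofList string.toList
  let cnt : Int := string'.foldl (fun cnt st_ => if st_ ∈ answer then cnt + 1 else cnt) 0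
  if cnt = 26 then 1 else 0

-- ===== PORT B =====
def check_alt (string : String) : Int :=
  if ("abcdefghijklmnopqrstuvwxyz".toList.all (fun c => string.toList.contains c)) then 1 else 0

-- ===== PRECONDITION & SPEC =====
def Spec_check (string : String) (out : Int) : Prop := out = check_alt string
instance (string : String) (out : Int) : Decidable (Spec_check string out) := by unfold Spec_check; infer_instance

-- ===== CLAIM (what is proved, stated in full; the proofs are below) =====
def Claim_equal_check : Prop := ∀ (string : String), Dom_check string → Spec_check string (check string)

-- ===== LEMMAS AND PROOFS =====

theorem pv_foldl_count (A : List Char) (l : List Char) (n : Int) :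
    l.foldl (fun cnt c => if c ∈ A then cnt + 1 else cnt) n
      = n + (l.countP (fun c => decide (c ∈ A)) : Nat) := by
  induction l generalizing n with
  | nil => simp
  | cons c t ih =>
      simp only [List.foldl_cons, List.countP_cons, ih]
      by_cases h : c ∈ A
      · simp [h]; ring
      · simp [h]

theorem pv_count_iff (A : List Char) (hA : A.Nodup) (S : List Char) (hS : S.Nodup) :
    (S.countP (fun c => decide (c ∈ A)) = A.length) ↔ ∀ c ∈ A, c ∈ S := by
  rw [List.countP_eq_length_filter]
  set F := S.filter (fun c => decide (c ∈ A)) with hF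
  have hFnd : F.Nodup := hS.filter _
  have hFA : ∀ c ∈ F, c ∈ A := by
    intro c hc
    have := List.of_mem_filter hc
    simpa using this
  have hsub : F.toFinset ⊆ A.toFinset := by
    intro c hc
    simp only [List.mem_toFinset] at *
    exact hFA c hc
  constructor
  · intro hlen c hcA
    have hcard : A.toFinset.card ≤ F.toFinset.card := by
      rw [List.toFinset_card_of_nodup hFnd, List.toFinset_card_of_nodup hA, hlen]
    have heq : F.toFinset = A.toFinset := Finset.eq_of_subset_of_card_le hsub hcard
    have : c ∈ F.toFinset := by rw [heq]; simpa using hcA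
    have : c ∈ F := by simpa using this
    exact List.mem_of_mem_filter this
  · intro hall
    have hsub2 : A.toFinset ⊆ F.toFinset := by
      intro c hc
      simp only [List.mem_toFinset] at *
      exact List.mem_filter.2 ⟨hall c hc, by simpa using hc⟩
    have heq : F.toFinset = A.toFinset := Finset.Subset.antisymm hsub hsub2
    have := congrArg Finset.card heq
    rwa [List.toFinset_card_of_nodup hFnd, List.toFinset_card_of_nodup hA] at this

-- ===== VERDICT (by name: the statement is the Claim_ definition above) =====
theorem check_spec : Claim_equal_check := by
  unfold Claim_equal_check Spec_check check check_alt
  intro s _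
  simp only []
  set A : List Char := "abcdefghijklmnopqrstuvwxyz".toList with hAdef
  have hA : A.Nodup := by rw [hAdef]; decide
  have hAlen : A.length = 26 := by rw [hAdef]; decide
  set S : List Char := PySem.Set.ofList s.toList with hSdef
  have hS : S.Nodup := PySem.Set.nodup_ofList _
  rw [pv_foldl_count A S 0, zero_add]
  have hmemS : ∀ c, c ∈ S ↔ c ∈ s.toList := by
    intro c; rw [hSdef]; exact (PySem.Set.mem_ofList (xs := s.toList) (y := c))
  have key : (S.countP (fun c => decide (c ∈ A)) = A.length) ↔ ∀ c ∈ A, c ∈ S :=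
    pv_count_iff A hA S hS
  by_cases h : ∀ c ∈ A, c ∈ s.toList
  · have h' : ∀ c ∈ A, c ∈ S := fun c hc => (hmemS c).2 (h c hc)
    have hc26 : S.countP (fun c => decide (c ∈ A)) = 26 := by
      rw [key.2 h', hAlen]
    have hb : A.all (fun c => s.toList.contains c) = true := by
      rw [List.all_eq_true]; intro c hc; simpa using h c hc
    rw [if_pos hb, if_pos (by rw [hc26]; norm_num)]
  · have h' : ¬ ∀ c ∈ A, c ∈ S := fun hh => h (fun c hc => (hmemS c).1 (hh c hc))
    have hc26 : S.countP (fun c => decide (c ∈ A)) ≠ 26 := by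
      intro hh; exact h' (key.1 (by rw [hh, hAlen]))
    have hb : A.all (fun c => s.toList.contains c) = false := by
      rw [List.all_eq_false]
      rcases not_forall.1 h with ⟨c, hc⟩
      rcases Classical.not_imp.1 hc with ⟨hcA, hcs⟩
      exact ⟨c, hcA, by simpa using hcs⟩
    have hne : ((S.countP (fun c => decide (c ∈ A)) : Nat) : Int) ≠ 26 := by
      intro hh; apply hc26; omega
    rw [if_neg hne, if_neg (by rw [hb]; simp)]
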